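-- pv_equiv track=rewrite | github.com/greydoubt/COMPLEXITY_LAND | 19_np_chromatic_potions.py | check_resource_availability
-- ===== SOURCE A (Python) =====
-- def check_resource_availability(required_resources, spider_deployments, cost_threshold):
--     total_cost = 0
--
--     # Check if all required resources are found within the cost threshold
--     for resource in required_resources:
--         found = False
--         for deployment in spider_deployments:
--             if resource in deployment:
--                 found = True
--                 total_cost += deployment[resource]  # Add the cost of obtaining the resource
--                 break
--         if not found:
--             return False
--
--         if total_cost > cost_threshold:
--             return False
--
--     # If all required resources are found within the cost threshold, return True
--     return True
-- ===== SOURCE B (Python) =====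
-- def check_resource_availability(required_resources, spider_deployments, cost_threshold):
--     # Pass 1: collect the cost of each required resource (first deployment holding it).
--     costs = []
--     for resource in required_resources:
--         for deployment in spider_deployments:
--             if resource in deployment:
--                 costs.append(deployment[resource])
--                 break
--         else:
--             return False
--     # Pass 2: every prefix sum must stay within the threshold.
--     running = 0
--     for c in costs:
--         running += c
--         if running > cost_threshold:
--             return False
--     return True
-- ===== Notes on version B (the rewrite author's own statement) =====
-- stated objective: alternative
-- what changed: Replaced A's single interleaved loop (find-cost and threshold check per resource) with two separate passes: first collect all resource costs (failing fast on a missing resource), then a prefix-sum scan against the threshold.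
import Mathlib
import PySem

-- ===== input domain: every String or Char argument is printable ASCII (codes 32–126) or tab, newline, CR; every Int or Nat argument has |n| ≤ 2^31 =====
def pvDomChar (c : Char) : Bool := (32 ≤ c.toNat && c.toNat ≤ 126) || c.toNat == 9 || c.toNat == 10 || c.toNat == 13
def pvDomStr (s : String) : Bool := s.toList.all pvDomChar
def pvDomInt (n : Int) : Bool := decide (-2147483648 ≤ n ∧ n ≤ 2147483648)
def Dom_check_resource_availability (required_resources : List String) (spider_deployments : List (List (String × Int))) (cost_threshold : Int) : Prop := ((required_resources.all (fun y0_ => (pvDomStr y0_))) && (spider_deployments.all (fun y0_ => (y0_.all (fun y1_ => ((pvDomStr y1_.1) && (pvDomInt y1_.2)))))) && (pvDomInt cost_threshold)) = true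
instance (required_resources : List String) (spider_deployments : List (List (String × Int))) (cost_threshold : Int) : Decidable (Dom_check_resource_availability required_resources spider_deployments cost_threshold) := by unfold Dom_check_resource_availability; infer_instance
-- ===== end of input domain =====

-- B replaces A's interleaved loop with two passes (collect costs, then prefix-sum check); return-value equivalence.
-- ===== PORT A =====
-- `resource in deployment` / `deployment[resource]`: first-match lookup in the assoc list.
def pyDictGet? (d : List (String × Int)) (k : String) : Option Int :=
  match d with
  | [] => none
  | (k', v) :: rest => if k' == k then some v else pyDictGet? rest k

-- inner `for deployment in spider_deployments: … break`
def pvFindCost (resource : String) : List (List (String × Int)) → Option Int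
  | [] => none
  | d :: ds =>
      match pyDictGet? d resource with
      | some v => some v
      | none => pvFindCost resource ds

-- outer loop of A, carrying total_cost
def pvLoopA (spider_deployments : List (List (String × Int))) (cost_threshold : Int) :
    List String → Int → Bool
  | [], _ => true
  | r :: rs, total =>
      match pvFindCost r spider_deployments with
      | none => false
      | some c =>
          let total' := total + c
          if total' > cost_threshold then false else pvLoopA spider_deployments cost_threshold rs total'

def check_resource_availability (required_resources : List String) (spider_deployments : List (List (String × Int))) (cost_threshold : Int) : Bool :=
  pvLoopA spider_deployments cost_threshold required_resources 0

-- ===== PORT B =====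
-- pass 1 of Source B: collect every resource's cost, or fail on a missing resource
def pvCollectCosts (spider_deployments : List (List (String × Int))) :
    List String → Option (List Int)
  | [] => some []
  | r :: rs =>
      match pvFindCost r spider_deployments with
      | none => none
      | some c =>
          match pvCollectCosts spider_deployments rs with
          | none => none
          | some cs => some (c :: cs)

-- pass 2 of Source B: running prefix sums must stay ≤ threshold
def pvPrefixOk (cost_threshold : Int) : List Int → Int → Bool
  | [], _ => true
  | c :: cs, running =>
      if running + c > cost_threshold then false else pvPrefixOk cost_threshold cs (running + c)

def check_resource_availability_alt (required_resources : List String) (spider_deployments : List (List (String × Int))) (cost_threshold : Int) : Bool :=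
  match pvCollectCosts spider_deployments required_resources with
  | none => false
  | some costs => pvPrefixOk cost_threshold costs 0

-- ===== PRECONDITION & SPEC =====
def Spec_check_resource_availability (required_resources : List String) (spider_deployments : List (List (String × Int))) (cost_threshold : Int) (out : Bool) : Prop := out = check_resource_availability_alt required_resources spider_deployments cost_threshold
instance (required_resources : List String) (spider_deployments : List (List (String × Int))) (cost_threshold : Int) (out : Bool) : Decidable (Spec_check_resource_availability required_resources spider_deployments cost_threshold out) := by unfold Spec_check_resource_availability; infer_instance

-- ===== CLAIM (what is proved, stated in full; the proofs are below) =====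
def Claim_equal_check_resource_availability : Prop := ∀ (required_resources : List String) (spider_deployments : List (List (String × Int))) (cost_threshold : Int), Dom_check_resource_availability required_resources spider_deployments cost_threshold → Spec_check_resource_availability required_resources spider_deployments cost_threshold (check_resource_availability required_resources spider_deployments cost_threshold)

-- ===== LEMMAS AND PROOFS =====
-- A's interleaved loop equals "collect then prefix-check", for any running total.
theorem pvLoopA_eq (deps : List (List (String × Int))) (t : Int) :
    ∀ (rs : List String) (total : Int),
      pvLoopA deps t rs total =
        (match pvCollectCosts deps rs with
         | none => false
         | some cs => pvPrefixOk t cs total) := by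
  intro rs
  induction rs with
  | nil => intro total; simp [pvLoopA, pvCollectCosts, pvPrefixOk]
  | cons r rs ih =>
      intro total
      simp only [pvLoopA, pvCollectCosts]
      cases pvFindCost r deps with
      | none => rfl
      | some c =>
          simp only []
          by_cases h : total + c > t
          · cases hc : pvCollectCosts deps rs <;> simp [pvPrefixOk, h]
          · rw [ih (total + c)]
            cases hc : pvCollectCosts deps rs <;> simp [pvPrefixOk, h]

-- ===== VERDICT (by name: the statement is the Claim_ definition above) =====
theorem check_resource_availability_spec : Claim_equal_check_resource_availability := by
  intro req deps t _
  unfold Spec_check_resource_availability check_resource_availability check_resource_availability_alt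
  exact pvLoopA_eq deps t req 0
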